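-- pv_equiv track=rewrite | github.com/iamhge/coding_test | Simulation/pro_땅따먹기.py | solution
-- ===== SOURCE A (Python) =====
-- def solution(land):
--     N = len(land)
--     M = len(land[0]) # 문제 상 4로 고정
--
--     # a = 위 -> 아래 탐색 시 해당 칸에서 갖는 가장 큰 점수
--     a = [[0 for _ in range(M)] for _ in range(N)]
--     a[0] = land[0]
--
--     for n in range(1, N):
--         for m in range(M):
--             for i in range(M):
--                 if i != m:
--                     a[n][m] = max(a[n][m], land[n][m] + a[n-1][i])
--
--     return max(a[N-1])
-- ===== SOURCE B (Python) =====
-- def solution(land):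
--     M = len(land[0])
--     prev = land[0][:M]
--     for row in land[1:]:
--         b1 = 0
--         for j in range(1, M):
--             if prev[j] > prev[b1]:
--                 b1 = j
--         v1 = prev[b1]
--         v2 = max(prev[j] for j in range(M) if j != b1)
--         prev = [max(0, row[m] + (v2 if m == b1 else v1)) for m in range(M)]
--     return max(prev)
-- ===== Notes on version B (the rewrite author's own statement) =====
-- stated objective: faster
-- what changed: Replaces the O(N*M^2) DP table with per-row triple loops by a single pass that keeps only the previous row and its best and second-best column values, making each cell O(1); the per-cell floor at 0 of A's recurrence is kept.
-- outside the precondition, e.g. on solution([[5], [3]]): A returns 0, B raises ValueError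
import Mathlib
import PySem

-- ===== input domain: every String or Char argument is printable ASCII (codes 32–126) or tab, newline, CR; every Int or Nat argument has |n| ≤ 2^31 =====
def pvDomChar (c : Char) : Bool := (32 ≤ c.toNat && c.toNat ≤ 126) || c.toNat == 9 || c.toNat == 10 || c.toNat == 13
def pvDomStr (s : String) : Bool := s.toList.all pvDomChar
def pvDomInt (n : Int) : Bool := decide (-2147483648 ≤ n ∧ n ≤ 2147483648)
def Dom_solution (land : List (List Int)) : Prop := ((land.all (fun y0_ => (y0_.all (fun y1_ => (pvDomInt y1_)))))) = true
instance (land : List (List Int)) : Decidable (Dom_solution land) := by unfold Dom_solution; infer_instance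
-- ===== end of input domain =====

-- B replaces A's O(N*M^2) DP table by a single pass keeping only the previous row and its
-- best / second-best column values (each cell O(1)); A's per-cell floor at 0 is part of the
-- recurrence and is kept.

-- ===== PORT A =====
def solution (land : List (List Int)) : Int :=
  let N : Int := land.length
  let M : Int := (PySem.List.pyGetD land 0 []).length
  let a : List (List Int) := List.replicate N.toNat (List.replicate M.toNat (0 : Int))
  let a := PySem.List.pySetD a 0 (PySem.List.pyGetD land 0 [])
  let a := (PySem.List.pyRange 1 N 1).foldl (fun a n =>
    (PySem.List.pyRange 0 M 1).foldl (fun a m =>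
      (PySem.List.pyRange 0 M 1).foldl (fun a i =>
        if i ≠ m then
          PySem.List.pySetD a n (PySem.List.pySetD (PySem.List.pyGetD a n []) m
            (max (PySem.List.pyGetD (PySem.List.pyGetD a n []) m 0)
                 (PySem.List.pyGetD (PySem.List.pyGetD land n []) m 0 +
                  PySem.List.pyGetD (PySem.List.pyGetD a (n - 1) []) i 0)))
        else a) a) a) a
  match PySem.List.max? (PySem.List.pyGetD a (N - 1) []) (fun x => x) with
  | some v => v
  | none => 0

-- ===== PORT B =====
def solution_alt (land : List (List Int)) : Int :=
  let M : Int := (PySem.List.pyGetD land 0 []).length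
  let prev0 : List Int := PySem.List.slice (PySem.List.pyGetD land 0 []) none (some M)
  let prev := (PySem.List.slice land (some 1) none).foldl (fun prev row =>
    let b1 : Int := (PySem.List.pyRange 1 M 1).foldl (fun b1 j =>
        if PySem.List.pyGetD prev j 0 > PySem.List.pyGetD prev b1 0 then j else b1) 0
    let v1 := PySem.List.pyGetD prev b1 0
    let v2 := match PySem.List.max?
        (((PySem.List.pyRange 0 M 1).filter (fun j => j ≠ b1)).map
          (fun j => PySem.List.pyGetD prev j 0)) (fun x => x) with
      | some v => v
      | none => 0   -- Python raises ValueError here (single column); outside Pre_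
    (PySem.List.pyRange 0 M 1).map (fun m =>
      max 0 (PySem.List.pyGetD row m 0 + (if m = b1 then v2 else v1)))) prev0
  match PySem.List.max? prev (fun x => x) with
  | some v => v
  | none => 0

-- ===== PRECONDITION & SPEC =====
-- Pre_ excludes: inputs where A raises (empty grid, empty first row, a later row shorter than
-- the first so land[n][m] is an IndexError); and single-column grids with more than one row,
-- on which B naturally raises ValueError (max of an empty generator: with one column there is
-- no admissible previous-row column) while A returns a value.
def Pre_solution (land : List (List Int)) : Prop :=
  land ≠ [] ∧ 1 ≤ (land.headD []).length ∧
  (∀ row ∈ land, (land.headD []).length ≤ row.length) ∧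
  (land.length = 1 ∨ 2 ≤ (land.headD []).length)
instance (land : List (List Int)) : Decidable (Pre_solution land) := by
  unfold Pre_solution; infer_instance

def pvWitness_solution : List (List Int) := [[1, 2], [3, 4]]

def Spec_solution (land : List (List Int)) (out : Int) : Prop := out = solution_alt land
instance (land : List (List Int)) (out : Int) : Decidable (Spec_solution land out) := by
  unfold Spec_solution; infer_instance

-- ===== CLAIM (what is proved, stated in full; the proofs are below) =====
def Claim_equal_solution : Prop :=
  ∀ (land : List (List Int)), Dom_solution land → Pre_solution land →
    Spec_solution land (solution land)

-- ===== LEMMAS AND PROOFS =====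

-- the value A's innermost loop leaves in cell (n, m): running max over i ≠ m of c + prev[i]
def pvVal (prev row : List Int) (M' : Nat) (m : Nat) : Int :=
  (List.range M').foldl
    (fun t (i : Nat) => if (i : Int) ≠ (m : Int) then max t (row.getD m 0 + prev.getD i 0) else t) 0

-- the row A's middle loop builds from the previous row
def pvRow (prev row : List Int) (M' : Nat) : List Int :=
  (List.range M').map (fun m => pvVal prev row M' m)

-- what B's loop body computes (B's body with M passed as a Nat)
def pvStepB (prev row : List Int) (M' : Nat) : List Int :=
  let M : Int := (M' : Int)
  let b1 : Int := (PySem.List.pyRange 1 M 1).foldl (fun b1 j =>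
      if PySem.List.pyGetD prev j 0 > PySem.List.pyGetD prev b1 0 then j else b1) 0
  let v1 := PySem.List.pyGetD prev b1 0
  let v2 := match PySem.List.max?
      (((PySem.List.pyRange 0 M 1).filter (fun j => j ≠ b1)).map
        (fun j => PySem.List.pyGetD prev j 0)) (fun x => x) with
    | some v => v
    | none => 0
  (PySem.List.pyRange 0 M 1).map (fun m =>
    max 0 (PySem.List.pyGetD row m 0 + (if m = b1 then v2 else v1)))

-- running max with an added constant, over a nonempty list
theorem pvFoldlMaxAdd (c : Int) : ∀ (t : List Int) (h a : Int),
    List.foldl (fun x v => max x (c + v)) a (h :: t) = max a (c + List.foldl max h t) := by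
  intro t
  induction t with
  | nil => intro h a; rfl
  | cons v t' ih =>
    intro h a
    simp only [List.foldl_cons] at *
    rw [ih v (max a (c + h)), List.foldl_assoc, ← max_add_add_left, ← max_assoc]

theorem pvFold0_eq_max? (c : Int) (xs : List Int) (w : Int)
    (hw : PySem.List.max? xs (fun y => y) = some w) :
    List.foldl (fun t v => max t (c + v)) 0 xs = max 0 (c + w) := by
  cases xs with
  | nil => simp [PySem.List.max?] at hw
  | cons h t =>
    rw [PySem.List.max?_id_cons] at hw
    rw [pvFoldlMaxAdd c t h 0]
    exact congrArg _ (congrArg _ (Option.some_inj.mp hw))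

theorem pvGetD_toNat {α : Type} (prev : List α) (d : α) (b : Int) (hb : 0 ≤ b) :
    PySem.List.pyGetD prev b d = prev.getD b.toNat d := by
  simp [PySem.List.pyGetD, PySem.List.pyGet?_of_nonneg prev hb, List.getD]

-- B's argmax scan over range(1, M)
def pvB1fold (prev : List Int) (j : Nat) : Int :=
  (List.range j).foldl (fun (b : Int) (k : Nat) =>
    if PySem.List.pyGetD prev (1 + (k : Int)) 0 > PySem.List.pyGetD prev b 0 then 1 + (k : Int)
    else b) 0

theorem pvB1fold_succ (prev : List Int) (j : Nat) :
    pvB1fold prev (j + 1) =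
      if prev.getD (j + 1) 0 > PySem.List.pyGetD prev (pvB1fold prev j) 0 then ((j : Int) + 1)
      else pvB1fold prev j := by
  unfold pvB1fold
  rw [List.range_succ, List.foldl_append]
  simp only [List.foldl_cons, List.foldl_nil]
  rw [show (1 + (j : Int)) = (((j + 1 : Nat) : Int)) by push_cast; ring, PySem.List.pyGetD_natCast]
  split_ifs
  · push_cast; ring
  · rfl

theorem pvB1fold_inv (prev : List Int) (j : Nat) :
    0 ≤ pvB1fold prev j ∧ (pvB1fold prev j).toNat ≤ j ∧
      ∀ i : Nat, i ≤ j → prev.getD i 0 ≤ prev.getD (pvB1fold prev j).toNat 0 := by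
  induction j with
  | zero =>
    refine ⟨le_refl _, by simp [pvB1fold], ?_⟩
    intro i hi
    interval_cases i
    simp [pvB1fold]
  | succ j ih =>
    obtain ⟨h0, hle, hmax⟩ := ih
    rw [pvB1fold_succ, pvGetD_toNat prev 0 _ h0]
    split_ifs with hcmp
    · refine ⟨by positivity, by omega, ?_⟩
      intro i hi
      rw [show ((j : Int) + 1).toNat = j + 1 by omega]
      rcases Nat.lt_succ_iff_lt_or_eq.mp (Nat.lt_succ_of_le hi) with h | h
      · exact le_trans (hmax i (by omega)) (le_of_lt hcmp)
      · rw [h]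
    · refine ⟨h0, by omega, ?_⟩
      intro i hi
      rcases Nat.lt_succ_iff_lt_or_eq.mp (Nat.lt_succ_of_le hi) with h | h
      · exact hmax i (by omega)
      · rw [h]; exact le_of_not_gt hcmp

theorem pvVal_eq (prev row : List Int) (M' m : Nat) (h2 : 2 ≤ M') (_hm : m < M') (b1 : Int)
    (h0 : 0 ≤ b1) (hb : b1.toNat < M')
    (hmax : ∀ i : Nat, i < M' → prev.getD i 0 ≤ prev.getD b1.toNat 0)
    (w2 : Int)
    (hw2 : PySem.List.max? (((List.range M').filter (fun (k : Nat) => decide ((k : Int) ≠ b1))).map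
      (fun k => prev.getD k 0)) (fun y => y) = some w2) :
    pvVal prev row M' m =
      max 0 (row.getD m 0 + if (m : Int) = b1 then w2 else prev.getD b1.toNat 0) := by
  have hval : pvVal prev row M' m =
      List.foldl (fun t v => max t (row.getD m 0 + v)) 0
        (((List.range M').filter (fun (i : Nat) => decide ((i : Int) ≠ (m : Int)))).map
          (fun i => prev.getD i 0)) := by
    unfold pvVal
    rw [PySem.List.foldl_ite_eq_foldl_filter, List.foldl_map]
  -- the candidate list is nonempty: some index ≠ m exists below M'
  have hne : (((List.range M').filter (fun (i : Nat) => decide ((i : Int) ≠ (m : Int)))).map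
      (fun i => prev.getD i 0)) ≠ [] := by
    have hmem : (if m = 0 then 1 else 0) ∈
        (List.range M').filter (fun (i : Nat) => decide ((i : Int) ≠ (m : Int))) := by
      rw [List.mem_filter, List.mem_range]
      constructor
      · split_ifs <;> omega
      · split_ifs with h <;> simp <;> omega
    intro hnil
    rw [List.map_eq_nil_iff] at hnil
    rw [hnil] at hmem
    exact absurd hmem (List.not_mem_nil)
  obtain ⟨wm, hwm⟩ : ∃ wm, PySem.List.max?
      (((List.range M').filter (fun (i : Nat) => decide ((i : Int) ≠ (m : Int)))).map
        (fun i => prev.getD i 0)) (fun y => y) = some wm := by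
    cases h : PySem.List.max? (((List.range M').filter
        (fun (i : Nat) => decide ((i : Int) ≠ (m : Int)))).map
        (fun i => prev.getD i 0)) (fun y => y) with
    | none => exact absurd ((PySem.List.max?_eq_none_iff _ _).mp h) hne
    | some w => exact ⟨w, rfl⟩
  rw [hval, pvFold0_eq_max? _ _ _ hwm]
  congr 1
  congr 1
  by_cases hmb : (m : Int) = b1
  · rw [if_pos hmb]
    rw [hmb] at hwm
    exact Option.some_inj.mp (hwm.symm.trans hw2)
  · rw [if_neg hmb]
    -- wm is max over i ≠ m; show it equals prev[b1]
    have hv1mem : prev.getD b1.toNat 0 ∈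
        (((List.range M').filter (fun (i : Nat) => decide ((i : Int) ≠ (m : Int)))).map
          (fun i => prev.getD i 0)) := by
      apply List.mem_map.mpr
      refine ⟨b1.toNat, ?_, rfl⟩
      rw [List.mem_filter, List.mem_range]
      refine ⟨hb, by simp; omega⟩
    have hle1 : prev.getD b1.toNat 0 ≤ wm := PySem.List.max?_isMax hwm _ hv1mem
    have hle2 : wm ≤ prev.getD b1.toNat 0 := by
      have := PySem.List.max?_mem hwm
      obtain ⟨i, hi, rfl⟩ := List.mem_map.mp this
      rw [List.mem_filter, List.mem_range] at hi
      exact hmax i hi.1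
    exact le_antisymm hle2 hle1


-- Int-indexed get/set facts used for A's table (all indices nonnegative)
theorem pvGetSet_same {α : Type} (a : List α) (n : Int) (v d : α)
    (h0 : 0 ≤ n) (hn : n < a.length) :
    PySem.List.pyGetD (PySem.List.pySetD a n v) n d = v := by
  rw [PySem.List.pySetD_of_nonneg a _ h0, pvGetD_toNat _ d n h0]
  have : n.toNat < a.length := by omega
  simp [List.getD, this]

theorem pvGetSet_other {α : Type} (a : List α) (n p : Int) (v d : α)
    (h0 : 0 ≤ n) (hp : 0 ≤ p) (hne : p ≠ n) :
    PySem.List.pyGetD (PySem.List.pySetD a n v) p d = PySem.List.pyGetD a p d := by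
  rw [PySem.List.pySetD_of_nonneg a _ h0, pvGetD_toNat _ d p hp, pvGetD_toNat a d p hp]
  have : n.toNat ≠ p.toNat := by omega
  simp [List.getD, List.getElem?_set_ne this]

theorem pvSetSet {α : Type} (a : List α) (n : Int) (v w : α) (h0 : 0 ≤ n) :
    PySem.List.pySetD (PySem.List.pySetD a n v) n w = PySem.List.pySetD a n w := by
  rw [PySem.List.pySetD_of_nonneg a _ h0, PySem.List.pySetD_of_nonneg _ _ h0,
    PySem.List.pySetD_of_nonneg a _ h0, List.set_set]

theorem pvSetGet_self {α : Type} (a : List α) (n : Int) (d : α)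
    (h0 : 0 ≤ n) (hn : n < a.length) :
    PySem.List.pySetD a n (PySem.List.pyGetD a n d) = a := by
  rw [PySem.List.pySetD_of_nonneg a _ h0, pvGetD_toNat a d n h0]
  have h : n.toNat < a.length := by omega
  rw [List.getD, List.getElem?_eq_getElem h]
  exact List.set_getElem_self h

-- A's innermost loop: only cell (n, m) of the table changes, accumulating a running max
theorem pvIloop (n m c : Int) (L : List Int) :
    ∀ (a : List (List Int)) (r prev : List Int),
      1 ≤ n → n < a.length →
      PySem.List.pyGetD a n [] = r → PySem.List.pyGetD a (n - 1) [] = prev →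
      0 ≤ m → m < r.length →
      L.foldl (fun a i =>
        if i ≠ m then
          PySem.List.pySetD a n (PySem.List.pySetD (PySem.List.pyGetD a n []) m
            (max (PySem.List.pyGetD (PySem.List.pyGetD a n []) m 0)
                 (c + PySem.List.pyGetD (PySem.List.pyGetD a (n - 1) []) i 0)))
        else a) a
      = PySem.List.pySetD a n (PySem.List.pySetD r m
          (L.foldl (fun t i => if i ≠ m then max t (c + PySem.List.pyGetD prev i 0) else t)
            (PySem.List.pyGetD r m 0))) := by
  induction L with
  | nil =>
    intro a r prev h1 hn har hap hm0 hmr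
    simp only [List.foldl_nil]
    rw [pvSetGet_self r m 0 hm0 hmr, ← har,
      pvSetGet_self a n [] (by omega) hn]
  | cons i L ih =>
    intro a r prev h1 hn har hap hm0 hmr
    by_cases him : i = m
    · simp only [List.foldl_cons, him, if_neg (not_not_intro rfl)]
      exact ih a r prev h1 hn har hap hm0 hmr
    · simp only [List.foldl_cons, if_pos him, har, hap]
      have hn0 : (0 : Int) ≤ n := by omega
      have hlen' : n < (PySem.List.pySetD a n
          (PySem.List.pySetD r m (max (PySem.List.pyGetD r m 0)
            (c + PySem.List.pyGetD prev i 0)))).length := by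
        rw [PySem.List.length_pySetD]; exact hn
      rw [ih _ (PySem.List.pySetD r m (max (PySem.List.pyGetD r m 0)
            (c + PySem.List.pyGetD prev i 0))) prev h1 hlen'
          (pvGetSet_same a n _ [] hn0 hn)
          (by rw [pvGetSet_other a n (n - 1) _ [] hn0 (by omega) (by omega)]; exact hap)
          hm0 (by rw [PySem.List.length_pySetD]; exact hmr)]
      rw [pvGetSet_same r m _ 0 hm0 hmr, pvSetSet r m _ _ hm0, pvSetSet a n _ _ hn0]

-- the inner loop's running max, as pvVal
theorem pvInnerVal (prev rowc : List Int) (M' m : Nat) :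
    (PySem.List.pyRange 0 (M' : Int)).foldl
      (fun t i => if i ≠ (m : Int) then
        max t (PySem.List.pyGetD rowc (m : Int) 0 + PySem.List.pyGetD prev i 0) else t) 0
    = pvVal prev rowc M' m := by
  rw [PySem.List.pyRange_one, List.foldl_map, show ((M' : Int) - 0).toNat = M' by omega]
  unfold pvVal
  apply PySem.List.foldl_congr_mem
  intro acc k _
  simp

-- A's middle loop: row n of the table becomes pvRow of the previous row
theorem pvMloop (land : List (List Int)) (n : Int) (rowc prev : List Int) (M' : Nat)
    (hrowc : PySem.List.pyGetD land n [] = rowc) :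
    ∀ (j : Nat) (a : List (List Int)), j ≤ M' → 1 ≤ n → n < a.length →
      PySem.List.pyGetD a n [] = List.replicate M' 0 →
      PySem.List.pyGetD a (n - 1) [] = prev →
      (PySem.List.pyRange 0 (j : Int)).foldl (fun a m =>
        (PySem.List.pyRange 0 (M' : Int)).foldl (fun a i =>
          if i ≠ m then
            PySem.List.pySetD a n (PySem.List.pySetD (PySem.List.pyGetD a n []) m
              (max (PySem.List.pyGetD (PySem.List.pyGetD a n []) m 0)
                   (PySem.List.pyGetD (PySem.List.pyGetD land n []) m 0 +
                    PySem.List.pyGetD (PySem.List.pyGetD a (n - 1) []) i 0)))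
          else a) a) a
      = PySem.List.pySetD a n
          ((List.range j).map (fun m => pvVal prev rowc M' m) ++ List.replicate (M' - j) 0) := by
  intro j
  induction j with
  | zero =>
    intro a _ h1 hn hz hap
    rw [show PySem.List.pyRange 0 ((0 : Nat) : Int) = [] from
      PySem.List.pyRange_one_eq_nil (by omega)]
    simp only [List.foldl_nil, List.range_zero, List.map_nil, List.nil_append, Nat.sub_zero]
    rw [← hz, pvSetGet_self a n [] (by omega) hn]
  | succ j ih =>
    intro a hj h1 hn hz hap
    rw [show ((j + 1 : Nat) : Int) = (j : Int) + 1 by push_cast; ring,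
      PySem.List.pyRange_one_succ_right (by positivity), List.foldl_append,
      ih a (by omega) h1 hn hz hap]
    simp only [List.foldl_cons, List.foldl_nil]
    have hn0 : (0 : Int) ≤ n := by omega
    have hlenp : ((List.range j).map (fun m => pvVal prev rowc M' m)
        ++ List.replicate (M' - j) 0).length = M' := by
      simp; omega
    rw [pvIloop n (j : Int) _ _ _ _ prev h1 (by rw [PySem.List.length_pySetD]; exact hn)
      (pvGetSet_same a n _ [] hn0 hn)
      (by rw [pvGetSet_other a n (n - 1) _ [] hn0 (by omega) (by omega)]; exact hap)
      (by positivity) (by rw [hlenp]; exact_mod_cast by omega)]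
    rw [show PySem.List.pyGetD ((List.range j).map (fun m => pvVal prev rowc M' m)
        ++ List.replicate (M' - j) 0) (j : Int) 0 = 0 by
      rw [pvGetD_toNat _ 0 _ (by positivity)]
      have : M' - j = (M' - j - 1) + 1 := by omega
      rw [Int.toNat_natCast, this, List.replicate_succ]
      simp]
    rw [hrowc, pvInnerVal prev rowc M' j]
    rw [pvSetSet a n _ _ hn0, PySem.List.pySetD_natCast]
    congr 1
    rw [List.range_succ, List.map_append,
      show M' - j = (M' - j - 1) + 1 by omega, List.replicate_succ]
    simp [Nat.sub_add_eq]

-- A's outer loop: after k rows, the table is garbage-prefix ++ current row ++ zero rows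
theorem pvOuter (r0 : List Int) (rest : List (List Int)) :
    ∀ (k : Nat), k ≤ rest.length →
      ∃ F : List (List Int), F.length = k ∧
      (PySem.List.pyRange 1 ((k : Int) + 1)).foldl (fun a n =>
        (PySem.List.pyRange 0 ((r0.length : Nat) : Int)).foldl (fun a m =>
          (PySem.List.pyRange 0 ((r0.length : Nat) : Int)).foldl (fun a i =>
            if i ≠ m then
              PySem.List.pySetD a n (PySem.List.pySetD (PySem.List.pyGetD a n []) m
                (max (PySem.List.pyGetD (PySem.List.pyGetD a n []) m 0)
                     (PySem.List.pyGetD (PySem.List.pyGetD (r0 :: rest) n []) m 0 +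
                      PySem.List.pyGetD (PySem.List.pyGetD a (n - 1) []) i 0)))
            else a) a) a)
        (r0 :: List.replicate rest.length (List.replicate r0.length 0))
      = F ++ ((rest.take k).foldl (fun prev row => pvRow prev row r0.length) r0)
          :: List.replicate (rest.length - k) (List.replicate r0.length 0) := by
  intro k
  induction k with
  | zero =>
    intro _
    refine ⟨[], rfl, ?_⟩
    rw [show ((0 : Nat) : Int) + 1 = 1 by ring,
      PySem.List.pyRange_one_eq_nil (a := 1) (b := 1) (by omega)]
    simp
  | succ k ih =>
    intro hk
    obtain ⟨F, hF, heq⟩ := ih (by omega)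
    refine ⟨F ++ [(rest.take k).foldl (fun prev row => pvRow prev row r0.length) r0],
      by simp [hF], ?_⟩
    rw [show (((k + 1 : Nat) : Int)) + 1 = ((k : Int) + 1) + 1 by push_cast; ring,
      PySem.List.pyRange_one_succ_right (by omega), List.foldl_append, heq]
    simp only [List.foldl_cons, List.foldl_nil]
    set Pk := (rest.take k).foldl (fun prev row => pvRow prev row r0.length) r0 with hPk
    have hsplit : F ++ Pk :: List.replicate (rest.length - k) (List.replicate r0.length 0)
        = (F ++ [Pk]) ++ List.replicate (rest.length - k) (List.replicate r0.length 0) := by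
      simp
    have hlen2 : (F ++ [Pk]).length = k + 1 := by simp [hF]
    have hrep : rest.length - k = (rest.length - (k + 1)) + 1 := by omega
    have hgetz : PySem.List.pyGetD
        (F ++ Pk :: List.replicate (rest.length - k) (List.replicate r0.length 0))
        ((k : Int) + 1) [] = List.replicate r0.length 0 := by
      rw [hsplit, show (k : Int) + 1 = (((k + 1 : Nat)) : Int) by push_cast; ring,
        pvGetD_toNat _ [] _ (by positivity), Int.toNat_natCast, List.getD,
        List.getElem?_append_right (by omega), hlen2, hrep]
      simp [List.replicate_succ]
    have hgetp : PySem.List.pyGetD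
        (F ++ Pk :: List.replicate (rest.length - k) (List.replicate r0.length 0))
        (((k : Int) + 1) - 1) [] = Pk := by
      rw [show ((k : Int) + 1) - 1 = ((k : Nat) : Int) by ring,
        pvGetD_toNat _ [] _ (by positivity), Int.toNat_natCast, List.getD,
        List.getElem?_append_right (by omega), hF]
      simp
    rw [pvMloop (r0 :: rest) ((k : Int) + 1) (rest.getD k []) Pk r0.length
      (by rw [show (k : Int) + 1 = (((k + 1 : Nat)) : Int) by push_cast; ring,
            pvGetD_toNat _ [] _ (by positivity), Int.toNat_natCast]
          simp [List.getD]) r0.length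
      _ (le_refl _) (by omega)
      (by rw [List.length_append, List.length_cons, List.length_replicate, hF]
          push_cast; omega)
      hgetz hgetp]
    rw [Nat.sub_self, List.replicate_zero, List.append_nil, hsplit,
      PySem.List.pySetD_of_nonneg _ _ (by positivity),
      show (((k : Int) + 1)).toNat = (F ++ [Pk]).length by omega]
    rw [List.set_append, if_neg (by omega), Nat.sub_self, hrep, List.replicate_succ,
      List.set_cons_zero]
    rw [List.take_add_one, List.foldl_append, show rest[k]?.toList = [rest.getD k []] by
      rw [List.getD, List.getElem?_eq_getElem (by omega)]; simp]
    rw [← hPk]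
    simp [pvRow, List.getD]

theorem pvStep_eq (prev row : List Int) (M' : Nat) (h2 : 2 ≤ M') :
    pvStepB prev row M' = pvRow prev row M' := by
  dsimp only [pvStepB]
  have hb1eq : (PySem.List.pyRange 1 (M' : Int)).foldl
      (fun b1 j => if PySem.List.pyGetD prev j 0 > PySem.List.pyGetD prev b1 0 then j else b1) 0
      = pvB1fold prev (M' - 1) := by
    rw [PySem.List.pyRange_one, List.foldl_map,
      show ((M' : Int) - 1).toNat = M' - 1 by omega]
    rfl
  rw [hb1eq]
  obtain ⟨h0, hle, hmax'⟩ := pvB1fold_inv prev (M' - 1)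
  set b1 := pvB1fold prev (M' - 1) with hb1def
  have hb : b1.toNat < M' := by omega
  have hmax : ∀ i : Nat, i < M' → prev.getD i 0 ≤ prev.getD b1.toNat 0 := by
    intro i hi; exact hmax' i (by omega)
  have hlist : ((PySem.List.pyRange 0 (M' : Int)).filter (fun j => decide (j ≠ b1))).map
        (fun j => PySem.List.pyGetD prev j 0)
      = ((List.range M').filter (fun (k : Nat) => decide ((k : Int) ≠ b1))).map
        (fun k => prev.getD k 0) := by
    rw [PySem.List.pyRange_one, List.filter_map, List.map_map]
    simp [Function.comp_def]
  rw [hlist]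
  have hne : ((List.range M').filter (fun (k : Nat) => decide ((k : Int) ≠ b1))).map
      (fun k => prev.getD k 0) ≠ [] := by
    have hmem : (if b1 = 0 then 1 else 0) ∈
        (List.range M').filter (fun (k : Nat) => decide ((k : Int) ≠ b1)) := by
      rw [List.mem_filter, List.mem_range]
      constructor
      · split_ifs <;> omega
      · split_ifs with h <;> simp [h] <;> omega
    intro hnil
    rw [List.map_eq_nil_iff] at hnil
    rw [hnil] at hmem
    exact absurd hmem (List.not_mem_nil)
  obtain ⟨w2, hw2⟩ : ∃ w2, PySem.List.max?
      (((List.range M').filter (fun (k : Nat) => decide ((k : Int) ≠ b1))).map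
        (fun k => prev.getD k 0)) (fun y => y) = some w2 := by
    cases h : PySem.List.max?
        (((List.range M').filter (fun (k : Nat) => decide ((k : Int) ≠ b1))).map
          (fun k => prev.getD k 0)) (fun y => y) with
    | none => exact absurd ((PySem.List.max?_eq_none_iff _ _).mp h) hne
    | some w => exact ⟨w, rfl⟩
  rw [hw2]
  unfold pvRow
  rw [PySem.List.pyRange_one, List.map_map,
    show ((M' : Int) - 0).toNat = M' by omega]
  apply List.map_congr_left
  intro m hmem
  rw [List.mem_range] at hmem
  rw [pvVal_eq prev row M' m h2 hmem b1 h0 hb hmax w2 hw2]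
  simp only [Function.comp_def, zero_add, PySem.List.pyGetD_natCast,
    pvGetD_toNat prev 0 b1 h0]

theorem pvA_eq (land : List (List Int)) (h : Pre_solution land) :
    solution land =
      match PySem.List.max?
        ((land.tail).foldl (fun prev row => pvRow prev row (land.headD []).length)
          (land.headD [])) (fun x => x) with
      | some v => v
      | none => 0 := by
  obtain ⟨hne, h1, hrows, hcase⟩ := h
  obtain ⟨r0, rest, rfl⟩ : ∃ r0 rest, land = r0 :: rest :=
    ⟨land.headD [], land.tail, by cases land with | nil => exact absurd rfl hne | cons a l => rfl⟩
  dsimp only [solution]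
  rw [PySem.List.pyGetD_zero]
  simp only [List.getD_cons_zero, List.headD_cons, List.tail_cons, List.length_cons]
  rw [Int.toNat_natCast, Int.toNat_natCast]
  rw [show PySem.List.pySetD
      (List.replicate (rest.length + 1) (List.replicate r0.length (0 : Int))) 0 r0
      = r0 :: List.replicate rest.length (List.replicate r0.length 0) by
    rw [PySem.List.pySetD_of_nonneg _ _ (le_refl 0)]
    simp [List.replicate_succ]]
  rw [show ((rest.length + 1 : Nat) : Int) = ((rest.length : Int)) + 1 by push_cast; ring]
  obtain ⟨F, hF, heq⟩ := pvOuter r0 rest rest.length (le_refl _)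
  rw [show ((rest.length : Nat) : Int) + 1 = ((rest.length : Int)) + 1 by rfl] at heq
  rw [heq, List.take_length, Nat.sub_self, List.replicate_zero]
  rw [show ((rest.length : Int)) + 1 - 1 = ((F.length : Nat) : Int) by rw [hF]; ring]
  rw [pvGetD_toNat _ [] _ (by positivity), Int.toNat_natCast, List.getD,
    List.getElem?_append_right (le_refl _), Nat.sub_self]
  simp

theorem pvB_eq (land : List (List Int)) (h : Pre_solution land) :
    solution_alt land =
      match PySem.List.max?
        ((land.tail).foldl (fun prev row => pvStepB prev row (land.headD []).length)
          (land.headD [])) (fun x => x) with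
      | some v => v
      | none => 0 := by
  obtain ⟨hne, h1, hrows, hcase⟩ := h
  obtain ⟨r0, rest, rfl⟩ : ∃ r0 rest, land = r0 :: rest :=
    ⟨land.headD [], land.tail, by cases land with | nil => exact absurd rfl hne | cons a l => rfl⟩
  simp only [solution_alt, pvStepB, List.headD_cons, List.tail_cons,
    PySem.List.pyGetD_zero, List.getD_cons_zero, PySem.List.slice_from_one]
  simp only [PySem.List.slice_to_natCast, List.take_length]
  rfl

theorem pvFold_congr (M' : Nat) (rows : List (List Int)) (h2 : 2 ≤ M') :
    ∀ prev : List Int,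
      rows.foldl (fun prev row => pvRow prev row M') prev
        = rows.foldl (fun prev row => pvStepB prev row M') prev := by
  induction rows with
  | nil => intro prev; rfl
  | cons row t ih =>
    intro prev
    rw [List.foldl_cons, List.foldl_cons, pvStep_eq prev row M' h2, ih]

-- ===== VERDICT (by name: the statement is the Claim_ definition above) =====
theorem solution_spec : Claim_equal_solution := by
  intro land _ h
  unfold Spec_solution
  rw [pvA_eq land h, pvB_eq land h]
  obtain ⟨hne, h1, hrows, hcase⟩ := h
  rcases hcase with hone | h2
  · have htail : land.tail = [] := by
      cases land with
      | nil => rfl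
      | cons a l => simp at hone ⊢; simpa using hone
    rw [htail]
    rfl
  · rw [pvFold_congr (land.headD []).length land.tail h2]
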